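/- GENERATED by c/gen_decode.py: decode facts of the image, one per distinct instruction byte string. -/
import UserX.DecodeImage

#decode_all Gif.Dec
  "0f841a010000"  -- je 1070ba
  "0f845bffffff"  -- je 109fc6
  "0f84a3010000"  -- je 10a9cd
  "0f84db000000"  -- je 1095d1
  "0f85a6000000"  -- jne 10832a
  "0f8eb1010000"  -- jle 10a914
  "0f92c0"  -- setb al
  "0f9fc2"  -- setg dl
  "0fb6442420"  -- movzx eax,BYTE PTR [rsp+0x20]
  "0fb67302"  -- movzx esi,BYTE PTR [rbx+0x2]
  "39c5"  -- cmp ebp,eax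
  "3d01100000"  -- cmp eax,0x1001
  "410faff5"  -- imul esi,r13d
  "4139c6"  -- cmp r14d,eax
  "4183c701"  -- add r15d,0x1
  "4183ff03"  -- cmp r15d,0x3
  "41895c240c"  -- mov DWORD PTR [r12+0xc],ebx
  "4189c6"  -- mov r14d,eax
  "418b3c24"  -- mov edi,DWORD PTR [r12]
  "418b4c240c"  -- mov ecx,DWORD PTR [r12+0xc]
  "418b7504"  -- mov esi,DWORD PTR [r13+0x4]
  "41bf00000000"  -- mov r15d,0x0
  "41c744242002100000"  -- mov DWORD PTR [r12+0x20],0x1002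
  "41c7450067000000"  -- mov DWORD PTR [r13+0x0],0x67
  "41c784240400c00001f3f3f3"  -- mov DWORD PTR [r12+0xc00004],0xf3f3f301
  "41c7860400c00001f3f3f3"  -- mov DWORD PTR [r14+0xc00004],0xf3f3f301
  "440fb66c2420"  -- movzx r13d,BYTE PTR [rsp+0x20]
  "440fb67c2432"  -- movzx r15d,BYTE PTR [rsp+0x32]
  "4488ad60610000"  -- mov BYTE PTR [rbp+0x6160],r13b
  "44897318"  -- mov DWORD PTR [rbx+0x18],r14d
  "4489e8"  -- mov eax,r13d
  "4489f6"  -- mov esi,r14d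
  "448b642470"  -- mov r12d,DWORD PTR [rsp+0x70]
  "448b7560"  -- mov r14d,DWORD PTR [rbp+0x60]
  "450fb6f5"  -- movzx r14d,r13b
  "4584f6"  -- test r14b,r14b
  "45887758"  -- mov BYTE PTR [r15+0x58],r14b
  "458974241c"  -- mov DWORD PTR [r12+0x1c],r14d
  "48016c2410"  -- add QWORD PTR [rsp+0x10],rbp
  "4829c3"  -- sub rbx,rax
  "48634334"  -- movsxd rax,DWORD PTR [rbx+0x34]
  "4863f3"  -- movsxd rsi,ebx
  "48837b7000"  -- cmp QWORD PTR [rbx+0x70],0x0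
  "4883c460"  -- add rsp,0x60
  "4883ec68"  -- sub rsp,0x68
  "48896b30"  -- mov QWORD PTR [rbx+0x30],rbp
  "4889d1"  -- mov rcx,rdx
  "4889f0"  -- mov rax,rsi
  "488b5c2420"  -- mov rbx,QWORD PTR [rsp+0x20]
  "488b6b70"  -- mov rbp,QWORD PTR [rbx+0x70]
  "488b7b10"  -- mov rdi,QWORD PTR [rbx+0x10]
  "488b7d20"  -- mov rdi,QWORD PTR [rbp+0x20]
  "488d3c9d40131400"  -- lea rdi,[rbx*4+0x141340]
  "488d6c2410"  -- lea rbp,[rsp+0x10]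
  "488d7334"  -- lea rsi,[rbx+0x34]
  "488d7b01"  -- lea rdi,[rbx+0x1]
  "488d7b1c"  -- lea rdi,[rbx+0x1c]
  "488d7b40"  -- lea rdi,[rbx+0x40]
  "488d7d08"  -- lea rdi,[rbp+0x8]
  "488d7d50"  -- lea rdi,[rbp+0x50]
  "488d7f70"  -- lea rdi,[rdi+0x70]
  "48c1eb03"  -- shr rbx,0x3
  "48c7434800000000"  -- mov QWORD PTR [rbx+0x48],0x0
  "48c744240880181400"  -- mov QWORD PTR [rsp+0x8],0x141880
  "48c744241080801000"  -- mov QWORD PTR [rsp+0x10],0x108080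
  "48c7442410e0a11000"  -- mov QWORD PTR [rsp+0x10],0x10a1e0
  "48c744245820151400"  -- mov QWORD PTR [rsp+0x58],0x141520
  "48c7830000c00000000000"  -- mov QWORD PTR [rbx+0xc00000],0x0
  "49035d10"  -- add rbx,QWORD PTR [r13+0x10]
  "4963d5"  -- movsxd rdx,r13d
  "4983fc3f"  -- cmp r12,0x3f
  "4989cc"  -- mov r12,rcx
  "498b4638"  -- mov rax,QWORD PTR [r14+0x38]
  "498d2c84"  -- lea rbp,[r12+rax*4]
  "498d7c2408"  -- lea rdi,[r12+0x8]
  "498d7c242c"  -- lea rdi,[r12+0x2c]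
  "498d7d04"  -- lea rdi,[r13+0x4]
  "498d7e14"  -- lea rdi,[r14+0x14]
  "498d7f10"  -- lea rdi,[r15+0x10]
  "49c7463800000000"  -- mov QWORD PTR [r14+0x38],0x0
  "4c016500"  -- add QWORD PTR [rbp+0x0],r12
  "4c63fd"  -- movsxd r15,ebp
  "4c897368"  -- mov QWORD PTR [rbx+0x68],r14
  "4c89f6"  -- mov rsi,r14
  "4c8b6370"  -- mov r12,QWORD PTR [rbx+0x70]
  "4c8b7330"  -- mov r14,QWORD PTR [rbx+0x30]
  "4c8b7c2430"  -- mov r15,QWORD PTR [rsp+0x30]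
  "4c8d6401fe"  -- lea r12,[rcx+rax*1-0x2]
  "4d85e4"  -- test r12,r12
  "4d8b6c2410"  -- mov r13,QWORD PTR [r12+0x10]
  "72dc"  -- jb 1053b9
  "7415"  -- je 105f68
  "7436"  -- je 106c30
  "744b"  -- je 10a8ed
  "7471"  -- je 1079ac
  "74d8"  -- je 108ea5
  "7512"  -- jne 1098e3
  "7530"  -- jne 108114
  "75e5"  -- jne 10a2ea
  "7e24"  -- jle 106929
  "7f07"  -- jg 105064
  "803b00"  -- cmp BYTE PTR [rbx],0x0
  "837c242004"  -- cmp DWORD PTR [rsp+0x20],0x4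
  "83e308"  -- and ebx,0x8
  "83fd0b"  -- cmp ebp,0xb
  "892b"  -- mov DWORD PTR [rbx],ebp
  "894b2c"  -- mov DWORD PTR [rbx+0x2c],ecx
  "896c2438"  -- mov DWORD PTR [rsp+0x38],ebp
  "89d8"  -- mov eax,ebx
  "89f3"  -- mov ebx,esi
  "8b442414"  -- mov eax,DWORD PTR [rsp+0x14]
  "8b542430"  -- mov edx,DWORD PTR [rsp+0x30]
  "8b7304"  -- mov esi,DWORD PTR [rbx+0x4]
  "8d5a01"  -- lea ebx,[rdx+0x1]
  "ba06000000"  -- mov edx,0x6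
  "bb01000000"  -- mov ebx,0x1
  "bf38000000"  -- mov edi,0x38
  "c6430800"  -- mov BYTE PTR [rbx+0x8],0x0
  "c7430c00000000"  -- mov DWORD PTR [rbx+0xc],0x0
  "c7436066000000"  -- mov DWORD PTR [rbx+0x60],0x66
  "c7450002100000"  -- mov DWORD PTR [rbp+0x0],0x1002
  "c745606b000000"  -- mov DWORD PTR [rbp+0x60],0x6b
  "c7830c00c00000000000"  -- mov DWORD PTR [rbx+0xc0000c],0x0
  "e800d3ffff"  -- call 105f20
  "e803c6ffff"  -- call 105f20
  "e808f8ffff"  -- call 1067a0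
  "e80d57ffff"  -- call 100640
  "e810d9ffff"  -- call 1076c0
  "e81482ffff"  -- call 1003c0
  "e81869ffff"  -- call 100640
  "e81f76ffff"  -- call 100720
  "e82398ffff"  -- call 101440
  "e82757ffff"  -- call 100640
  "e82aabffff"  -- call 100800
  "e82e7cffff"  -- call 100800
  "e83187ffff"  -- call 100800
  "e832aeffff"  -- call 100300
  "e83659ffff"  -- call 100720
  "e83a9affff"  -- call 100720
  "e8408affff"  -- call 1003c0
  "e84396ffff"  -- call 100640
  "e84663ffff"  -- call 100800
  "e84889ffff"  -- call 1008e0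
  "e84bffffff"  -- call 105240
  "e851f9ffff"  -- call 108e00
  "e85494ffff"  -- call 1003c0
  "e859d2ffff"  -- call 107b40
  "e85fedffff"  -- call 109460
  "e865bdffff"  -- call 103800
  "e869a6ffff"  -- call 100720
  "e86cabffff"  -- call 100800
  "e870d7ffff"  -- call 105f20
  "e876afffff"  -- call 103800
  "e87a89ffff"  -- call 1008e0
  "e87fd1ffff"  -- call 106020
  "e88785ffff"  -- call 100720
  "e88aa4ffff"  -- call 100720
  "e88d72ffff"  -- call 100720
  "e895c6ffff"  -- call 105f20
  "e89997ffff"  -- call 1003c0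
  "e89f7affff"  -- call 100720
  "e8a5b1ffff"  -- call 100640
  "e8a9e3ffff"  -- call 105160
  "e8ad8dffff"  -- call 100720
  "e8af86ffff"  -- call 1008e0
  "e8b392ffff"  -- call 103800
  "e8b79affff"  -- call 100640
  "e8ba61ffff"  -- call 100720
  "e8be71ffff"  -- call 100640
  "e8c2adffff"  -- call 100640
  "e8c758ffff"  -- call 100720
  "e8c97affff"  -- call 100720
  "e8ce81ffff"  -- call 1008e0
  "e8d3ddffff"  -- call 105f20
  "e8d8adffff"  -- call 100300
  "e8de5cffff"  -- call 100640
  "e8e173ffff"  -- call 1008e0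
  "e8e4a4ffff"  -- call 100720
  "e8ea5effff"  -- call 100640
  "e8ef95ffff"  -- call 1003c0
  "e8f456ffff"  -- call 100640
  "e8f970ffff"  -- call 100720
  "e8ff72ffff"  -- call 1003c0
  "e930ffffff"  -- jmp 108ffe
  "e941ffffff"  -- jmp 106874
  "e965ffffff"  -- jmp 107ba6
  "e98dfdffff"  -- jmp 1080f7
  "e9b8030000"  -- jmp 106f7d
  "e9fdfeffff"  -- jmp 106f7d
  "eb58"  -- jmp 106f12
  "eba4"  -- jmp 109fc6
  "ebb6"  -- jmp 109afb
  "ebd1"  -- jmp 10778b
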